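-- pv_equiv track=rewrite | github.com/theabbie/leetcode | miscellaneous/A_Extremely_Round.py | count
-- ===== SOURCE A (Python) =====
-- def count(x):
--     if x < 10:
--         return x
--     if x < 100:
--         return x // 10 + count(9)
--     if x < 1000:
--         return x // 100 + count(99)
--     if x < 10000:
--         return x // 1000 + count(999)
--     if x < 100000:
--         return x // 10000 + count(9999)
--     if x < 1000000:
--         return x // 100000 + count(99999)
-- ===== SOURCE B (Python) =====
-- def count(x):
--     if x < 10:
--         return x
--     p = 10
--     for k in range(1, 6):
--         if x < p * 10:
--             return x // p + 9 * k
--         p *= 10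
-- ===== Notes on version B (the rewrite author's own statement) =====
-- stated objective: simpler
-- what changed: Replaces the recursive if-chain (each bracket recursing on 9...9) with a single iterative loop maintaining the power of ten and using the closed constant 9*k per bracket.
-- outside the precondition, e.g. on count(1000000): A returns None, B returns None
import Mathlib
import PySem

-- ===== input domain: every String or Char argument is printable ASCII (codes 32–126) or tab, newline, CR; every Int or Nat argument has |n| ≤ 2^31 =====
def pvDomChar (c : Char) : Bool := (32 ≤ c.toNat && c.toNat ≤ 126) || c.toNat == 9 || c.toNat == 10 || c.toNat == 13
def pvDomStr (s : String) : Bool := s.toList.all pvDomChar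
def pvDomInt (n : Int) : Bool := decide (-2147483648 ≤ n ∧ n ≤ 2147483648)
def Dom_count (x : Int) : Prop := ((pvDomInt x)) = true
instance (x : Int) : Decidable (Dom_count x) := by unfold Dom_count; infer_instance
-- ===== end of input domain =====

-- B replaces A's recursive if-chain with one iterative loop over the brackets (objective: simpler decomposition).


-- ===== PORT A =====
-- literal transliteration of A's recursive if-chain; the final fall-through (x ≥ 10^6),
-- where Python returns None, is outside Pre_count and ported as 0.
def count (x : Int) : Int :=
  if x < 10 then x
  else if x < 100 then PySem.Int.floordiv x 10 + count 9
  else if x < 1000 then PySem.Int.floordiv x 100 + count 99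
  else if x < 10000 then PySem.Int.floordiv x 1000 + count 999
  else if x < 100000 then PySem.Int.floordiv x 10000 + count 9999
  else if x < 1000000 then PySem.Int.floordiv x 100000 + count 99999
  else 0
termination_by x.toNat
decreasing_by all_goals omega

-- ===== PORT B =====
-- loop body of Source B: state is (p, result-so-far); once a result is found it is kept.
def countAltStep (x : Int) (st : Int × Option Int) (k : Int) : Int × Option Int :=
  match st with
  | (p, some r) => (p, some r)
  | (p, none) =>
      if x < p * 10 then (p, some (PySem.Int.floordiv x p + 9 * k))
      else (p * 10, none)

def count_alt (x : Int) : Int :=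
  if x < 10 then x
  else
    match ((PySem.List.pyRange 1 6 1).foldl (countAltStep x) (10, none)).2 with
    | some r => r
    | none => 0   -- Python's fall-through None (x ≥ 10^6), outside Pre_count

-- ===== PRECONDITION & SPEC =====
-- Pre_count excludes x ≥ 10^6, where A falls through all brackets and returns None (not an int).
def Pre_count (x : Int) : Prop := x < 1000000
instance (x : Int) : Decidable (Pre_count x) := by unfold Pre_count; infer_instance
def pvWitness_count : Int := 54321
def Spec_count (x : Int) (out : Int) : Prop := out = count_alt x
instance (x : Int) (out : Int) : Decidable (Spec_count x out) := by unfold Spec_count; infer_instance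

-- ===== CLAIM (what is proved, stated in full; the proofs are below) =====
def Claim_equal_count : Prop := ∀ (x : Int), Dom_count x → Pre_count x → Spec_count x (count x)

-- ===== LEMMAS AND PROOFS =====
theorem pyRange16 : PySem.List.pyRange 1 6 1 = [1, 2, 3, 4, 5] := by decide

theorem count9 : count 9 = 9 := by rw [count.eq_def]; norm_num
theorem count99 : count 99 = 18 := by
  rw [count.eq_def]; norm_num [count9, PySem.Int.floordiv]; decide
theorem count999 : count 999 = 27 := by
  rw [count.eq_def]; norm_num [count99, PySem.Int.floordiv]; decide
theorem count9999 : count 9999 = 36 := by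
  rw [count.eq_def]; norm_num [count999, PySem.Int.floordiv]; decide
theorem count99999 : count 99999 = 45 := by
  rw [count.eq_def]; norm_num [count9999, PySem.Int.floordiv]; decide

theorem alt_lt10 (x : Int) (h1 : x < 10) : count_alt x = x := by
  unfold count_alt; rw [if_pos h1]
theorem alt_b1 (x : Int) (h1 : ¬ x < 10) (h2 : x < 100) :
    count_alt x = PySem.Int.floordiv x 10 + 9 := by
  unfold count_alt; rw [if_neg h1, pyRange16]
  simp only [List.foldl, countAltStep]; norm_num [h2]
theorem alt_b2 (x : Int) (h1 : ¬ x < 10) (h2 : ¬ x < 100) (h3 : x < 1000) :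
    count_alt x = PySem.Int.floordiv x 100 + 18 := by
  unfold count_alt; rw [if_neg h1, pyRange16]
  simp only [List.foldl, countAltStep]; norm_num [h2, h3]
theorem alt_b3 (x : Int) (h1 : ¬ x < 10) (h2 : ¬ x < 100) (h3 : ¬ x < 1000) (h4 : x < 10000) :
    count_alt x = PySem.Int.floordiv x 1000 + 27 := by
  unfold count_alt; rw [if_neg h1, pyRange16]
  simp only [List.foldl, countAltStep]; norm_num [h2, h3, h4]
theorem alt_b4 (x : Int) (h1 : ¬ x < 10) (h2 : ¬ x < 100) (h3 : ¬ x < 1000) (h4 : ¬ x < 10000)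
    (h5 : x < 100000) : count_alt x = PySem.Int.floordiv x 10000 + 36 := by
  unfold count_alt; rw [if_neg h1, pyRange16]
  simp only [List.foldl, countAltStep]; norm_num [h2, h3, h4, h5]
theorem alt_b5 (x : Int) (h1 : ¬ x < 10) (h2 : ¬ x < 100) (h3 : ¬ x < 1000) (h4 : ¬ x < 10000)
    (h5 : ¬ x < 100000) (h6 : x < 1000000) :
    count_alt x = PySem.Int.floordiv x 100000 + 45 := by
  unfold count_alt; rw [if_neg h1, pyRange16]
  simp only [List.foldl, countAltStep]; norm_num [h2, h3, h4, h5, h6]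

-- ===== VERDICT (by name: the statement is the Claim_ definition above) =====
theorem count_spec : Claim_equal_count := by
  intro x _ hpre
  unfold Pre_count at hpre
  unfold Spec_count
  rw [count.eq_def]
  split_ifs with h1 h2 h3 h4 h5
  · rw [alt_lt10 x h1]
  · rw [alt_b1 x h1 h2, count9]
  · rw [alt_b2 x h1 h2 h3, count99]
  · rw [alt_b3 x h1 h2 h3 h4, count999]
  · rw [alt_b4 x h1 h2 h3 h4 h5, count9999]
  · rw [alt_b5 x h1 h2 h3 h4 h5 hpre, count99999]
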